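-- pv_equiv track=rewrite | github.com/navig-run/core | navig/selfheal/ssh_healer.py | _sanitize_ssh_verbose
-- ===== SOURCE A (Python) =====
-- def _sanitize_ssh_verbose(output: str) -> str:
--     """Strip verbose debug1 lines, keep only the substantive lines."""
--     lines = output.splitlines()
--     key_lines = [
--         line
--         for line in lines
--         if not line.startswith("debug1: ")
--         or any(
--             kw in line
--             for kw in (
--                 "Connecting",
--                 "connect",
--                 "cipher",
--                 "Authentications",
--                 "Permission",
--                 "Error",
--                 "Warning",
--                 "failed",
--             )
--         )
--     ]
--     return "\n".join(key_lines[-15:])  # last 15 significant lines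
-- ===== SOURCE B (Python) =====
-- def _sanitize_ssh_verbose(output: str) -> str:
--     """Strip verbose debug1 lines, keep only the substantive lines."""
--     keywords = (
--         "Connecting",
--         "connect",
--         "cipher",
--         "Authentications",
--         "Permission",
--         "Error",
--         "Warning",
--         "failed",
--     )
--     buf = []
--     for line in reversed(output.splitlines()):
--         if not line.startswith("debug1: ") or any(kw in line for kw in keywords):
--             buf.append(line)
--             if len(buf) == 15:
--                 break
--     buf.reverse()
--     return "\n".join(buf)
-- ===== Notes on version B (the rewrite author's own statement) =====
-- stated objective: alternative
-- what changed: B scans the lines from the end, collecting lines that pass the keep-predicate into a bounded buffer and stopping as soon as 15 are found, then reverses the buffer; A filters the whole list and slices the last 15.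
import Mathlib
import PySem

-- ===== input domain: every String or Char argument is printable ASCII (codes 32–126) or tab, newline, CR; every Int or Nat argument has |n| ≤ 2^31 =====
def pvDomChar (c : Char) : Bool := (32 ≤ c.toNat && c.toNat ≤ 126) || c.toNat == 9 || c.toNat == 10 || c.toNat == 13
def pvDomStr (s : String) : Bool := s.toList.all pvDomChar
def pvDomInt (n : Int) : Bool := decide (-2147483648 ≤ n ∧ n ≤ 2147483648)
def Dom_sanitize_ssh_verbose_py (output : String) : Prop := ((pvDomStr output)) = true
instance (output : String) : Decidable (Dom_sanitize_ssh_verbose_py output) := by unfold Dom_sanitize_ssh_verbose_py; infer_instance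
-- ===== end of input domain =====

-- B replaces A's filter-all-then-slice-last-15 by a reverse scan that stops after 15 kept lines (alternative traversal with early exit).

-- ===== PORT A =====
def pvKeywordsA : List String :=
  ["Connecting", "connect", "cipher", "Authentications",
   "Permission", "Error", "Warning", "failed"]

def pvKeepA (line : String) : Bool :=
  !(PySem.Str.startswith line "debug1: ")
    || pvKeywordsA.any (fun kw => PySem.Str.isIn kw line)

def sanitize_ssh_verbose_py (output : String) : String :=
  let lines := PySem.Str.splitlines output
  let key_lines := lines.filter pvKeepA
  PySem.Str.join "\n" (PySem.List.slice key_lines (some (-15)) none)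

-- ===== PORT B =====
def pvKeywordsB : List String :=
  ["Connecting", "connect", "cipher", "Authentications",
   "Permission", "Error", "Warning", "failed"]

def pvKeepB (line : String) : Bool :=
  !(PySem.Str.startswith line "debug1: ")
    || pvKeywordsB.any (fun kw => PySem.Str.isIn kw line)

-- the for-loop of B: walk the reversed lines, append kept lines to buf, break at 15
def pvCollect : List String → List String → List String
  | [], buf => buf
  | l :: rest, buf =>
    if pvKeepB l then
      let buf' := buf ++ [l]
      if buf'.length == 15 then buf' else pvCollect rest buf'
    else pvCollect rest buf

def sanitize_ssh_verbose_py_alt (output : String) : String :=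
  let buf := pvCollect (PySem.Str.splitlines output).reverse []
  PySem.Str.join "\n" buf.reverse

-- ===== PRECONDITION & SPEC =====
def Spec_sanitize_ssh_verbose_py (output : String) (out : String) : Prop := out = sanitize_ssh_verbose_py_alt output
instance (output : String) (out : String) : Decidable (Spec_sanitize_ssh_verbose_py output out) := by unfold Spec_sanitize_ssh_verbose_py; infer_instance

-- ===== CLAIM (what is proved, stated in full; the proofs are below) =====
def Claim_equal_sanitize_ssh_verbose_py : Prop := ∀ (output : String), Dom_sanitize_ssh_verbose_py output → Spec_sanitize_ssh_verbose_py output (sanitize_ssh_verbose_py output)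

-- ===== LEMMAS AND PROOFS =====

theorem pvKeep_eq : pvKeepB = pvKeepA := rfl

-- loop invariant: collecting into a buffer shorter than 15 appends the first
-- (15 - |buf|) kept lines of the remaining input
theorem pvCollect_eq (l : List String) : ∀ (buf : List String), buf.length < 15 →
    pvCollect l buf = buf ++ (l.filter pvKeepB).take (15 - buf.length) := by
  induction l with
  | nil => intro buf _; simp [pvCollect]
  | cons x rest ih =>
    intro buf hb
    by_cases hk : pvKeepB x
    · simp only [pvCollect, hk, if_true]
      by_cases h15 : (buf ++ [x]).length = 15
      · have heq : ((buf ++ [x]).length == 15) = true := by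
          simp only [beq_iff_eq]; exact h15
        simp only [heq, if_true]
        have hb14 : buf.length = 14 := by
          simp only [List.length_append, List.length_cons, List.length_nil] at h15; omega
        simp [hk, hb14, List.take_succ_cons]
      · have hne : ((buf ++ [x]).length == 15) = false := by
          simp only [beq_eq_false_iff_ne, ne_eq]; exact h15
        simp only [hne, Bool.false_eq_true, if_false]
        have hlt : (buf ++ [x]).length < 15 := by
          simp only [List.length_append, List.length_cons, List.length_nil] at h15 ⊢; omega
        rw [ih (buf ++ [x]) hlt]
        have h1 : 15 - buf.length = (15 - (buf ++ [x]).length) + 1 := by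
          simp only [List.length_append, List.length_cons, List.length_nil]; omega
        simp [hk, h1, List.take_succ_cons]
    · simp only [pvCollect]
      rw [if_neg hk, ih buf hb]
      simp [hk]

-- ===== VERDICT (by name: the statement is the Claim_ definition above) =====
theorem sanitize_ssh_verbose_py_spec : Claim_equal_sanitize_ssh_verbose_py := by
  intro output _
  unfold Spec_sanitize_ssh_verbose_py sanitize_ssh_verbose_py sanitize_ssh_verbose_py_alt
  dsimp only
  rw [pvCollect_eq _ [] (by simp)]
  rw [PySem.List.slice_from_neg_ofNat _ 15 (by omega)]
  simp only [List.nil_append, List.length_nil, Nat.sub_zero]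
  rw [pvKeep_eq, List.filter_reverse, List.take_reverse, List.reverse_reverse]
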